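-- pv_equiv track=rewrite | github.com/fufuzzz/note | Python基础/第02周_预习/第02周/day09/homework/Day09作业.py | fn
-- ===== SOURCE A (Python) =====
-- def fn(s):
--     q = 0
--     z = 0
--     k = 0
--     x = 0
--     for n in s:
--         if n.isnumeric():
--             q += 1
--         elif n.isalpha():
--             z += 1
--         elif n == ' ':
--             k += 1
--         else:
--             x += 1
--
--     return q, z, k, x
-- ===== SOURCE B (Python) =====
-- def fn(s):
--     q = sum(c.isnumeric() for c in s)
--     z = sum(c.isalpha() for c in s)
--     k = sum(c == ' ' for c in s)
--     return q, z, k, len(s) - q - z - k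
-- ===== Notes on version B (the rewrite author's own statement) =====
-- stated objective: simpler
-- what changed: Replaces A's single stateful four-way if/elif/else loop with three independent one-category counting passes, deriving the fourth count as the closed-form remainder len(s) - q - z - k.
import Mathlib
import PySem

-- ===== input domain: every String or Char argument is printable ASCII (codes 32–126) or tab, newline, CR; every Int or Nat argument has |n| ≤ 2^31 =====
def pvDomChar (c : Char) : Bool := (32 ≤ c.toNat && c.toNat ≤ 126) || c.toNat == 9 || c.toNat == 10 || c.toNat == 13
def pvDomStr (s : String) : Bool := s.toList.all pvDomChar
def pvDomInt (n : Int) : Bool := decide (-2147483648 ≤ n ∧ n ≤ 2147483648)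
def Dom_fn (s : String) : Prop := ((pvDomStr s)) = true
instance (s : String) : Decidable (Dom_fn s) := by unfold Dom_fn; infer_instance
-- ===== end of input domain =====

-- B replaces A's single four-way if/elif loop by three independent counting passes
-- plus a closed-form remainder len(s) - q - z - k for the 'others' bucket (objective: simpler).

-- ===== PORT A =====
-- c.isnumeric() ported as PySem.Chars.isdigit (exact on the ASCII domain Dom_fn).
def fn (s : String) : Int × Int × Int × Int :=
  s.toList.foldl
    (fun (acc : Int × Int × Int × Int) n =>
      if PySem.Chars.isdigit n then (acc.1 + 1, acc.2.1, acc.2.2.1, acc.2.2.2)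
      else if PySem.Chars.isalpha n then (acc.1, acc.2.1 + 1, acc.2.2.1, acc.2.2.2)
      else if n == ' ' then (acc.1, acc.2.1, acc.2.2.1 + 1, acc.2.2.2)
      else (acc.1, acc.2.1, acc.2.2.1, acc.2.2.2 + 1))
    (0, 0, 0, 0)

-- ===== PORT B =====
-- each sum(...) of a 0/1 comprehension is the count of matching characters (countP)
def fn_alt (s : String) : Int × Int × Int × Int :=
  let q : Int := s.toList.countP PySem.Chars.isdigit
  let z : Int := s.toList.countP PySem.Chars.isalpha
  let k : Int := s.toList.countP (fun c => c == ' ')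
  (q, z, k, PySem.Str.len s - q - z - k)

-- ===== PRECONDITION & SPEC =====
def Spec_fn (s : String) (out : Int × Int × Int × Int) : Prop := out = fn_alt s
instance (s : String) (out : Int × Int × Int × Int) : Decidable (Spec_fn s out) := by unfold Spec_fn; infer_instance

-- ===== CLAIM (what is proved, stated in full; the proofs are below) =====
def Claim_equal_fn : Prop := ∀ (s : String), Dom_fn s → Spec_fn s (fn s)

-- ===== LEMMAS AND PROOFS =====

lemma digit_not_alpha (c : Char) (h : PySem.Chars.isdigit c = true) :
    PySem.Chars.isalpha c = false := by
  have h0 : '0'.val.toNat = 48 := rfl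
  have h9 : '9'.val.toNat = 57 := rfl
  have hA : 'A'.val.toNat = 65 := rfl
  have hZ : 'Z'.val.toNat = 90 := rfl
  have ha : 'a'.val.toNat = 97 := rfl
  have hz : 'z'.val.toNat = 122 := rfl
  simp only [PySem.Chars.isdigit, PySem.Chars.isalpha, PySem.Chars.isupper, PySem.Chars.islower,
    Bool.and_eq_true, Bool.or_eq_false_iff, Bool.and_eq_false_iff, decide_eq_true_eq,
    decide_eq_false_iff_not, not_le, Char.le_def, UInt32.le_iff_toNat_le] at *
  omega

lemma fn_loop (l : List Char) (q z k x : Int) :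
    l.foldl
      (fun (acc : Int × Int × Int × Int) n =>
        if PySem.Chars.isdigit n then (acc.1 + 1, acc.2.1, acc.2.2.1, acc.2.2.2)
        else if PySem.Chars.isalpha n then (acc.1, acc.2.1 + 1, acc.2.2.1, acc.2.2.2)
        else if n == ' ' then (acc.1, acc.2.1, acc.2.2.1 + 1, acc.2.2.2)
        else (acc.1, acc.2.1, acc.2.2.1, acc.2.2.2 + 1))
      (q, z, k, x)
    = (q + l.countP PySem.Chars.isdigit,
       z + l.countP PySem.Chars.isalpha,
       k + l.countP (fun c => c == ' '),
       x + (l.length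
            - l.countP PySem.Chars.isdigit
            - l.countP PySem.Chars.isalpha
            - l.countP (fun c => c == ' '))) := by
  induction l generalizing q z k x with
  | nil => simp
  | cons c t ih =>
    by_cases hd : PySem.Chars.isdigit c = true
    · have ha : PySem.Chars.isalpha c = false := digit_not_alpha c hd
      have hs : (c == ' ') = false := by
        cases hb : (c == ' ') with
        | false => rfl
        | true => exact absurd hd (by have := eq_of_beq hb; subst this; decide)
      simp only [List.foldl_cons, hd, if_true, ih, List.countP_cons, ha, hs,
        Bool.false_eq_true, if_false]
      refine Prod.ext ?_ (Prod.ext ?_ (Prod.ext ?_ ?_)) <;> (simp only [List.length_cons]; push_cast; ring)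
    · by_cases ha : PySem.Chars.isalpha c = true
      · have hs : (c == ' ') = false := by
          cases hb : (c == ' ') with
          | false => rfl
          | true => exact absurd ha (by have := eq_of_beq hb; subst this; decide)
        simp only [List.foldl_cons, eq_false_of_ne_true hd, ha, if_true, ih,
          List.countP_cons, hs, Bool.false_eq_true, if_false]
        refine Prod.ext ?_ (Prod.ext ?_ (Prod.ext ?_ ?_)) <;> (simp only [List.length_cons]; push_cast; ring)
      · by_cases hs : (c == ' ') = true
        · simp only [List.foldl_cons, eq_false_of_ne_true hd, eq_false_of_ne_true ha, hs,
            if_true, ih, List.countP_cons, Bool.false_eq_true, if_false]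
          refine Prod.ext ?_ (Prod.ext ?_ (Prod.ext ?_ ?_)) <;> (simp only [List.length_cons]; push_cast; ring)
        · simp only [List.foldl_cons, eq_false_of_ne_true hd, eq_false_of_ne_true ha,
            eq_false_of_ne_true hs, ih, List.countP_cons, Bool.false_eq_true, if_false]
          refine Prod.ext ?_ (Prod.ext ?_ (Prod.ext ?_ ?_)) <;> (simp only [List.length_cons]; push_cast; ring)

-- ===== VERDICT (by name: the statement is the Claim_ definition above) =====
theorem fn_spec : Claim_equal_fn := by
  intro s _
  unfold Spec_fn fn fn_alt
  rw [fn_loop]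
  simp only [PySem.Str.len]
  refine Prod.ext ?_ (Prod.ext ?_ (Prod.ext ?_ ?_)) <;> (push_cast; ring)
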